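-- pv_equiv track=rewrite | github.com/Saurabh262004/osu-replay-visualizer | modules/osuToJson.py | separateByColon
-- ===== SOURCE A (Python) =====
-- def separateByColon(string, intValue=False):
--   stringJson = '{'
--
--   stringElement = ''
--   for i in range(len(string)):
--     if string[i] == ':':
--       stringJson += f'\"{stringElement}\": '
--       stringElement = ''
--     elif string[i] == '\n':
--       if intValue and len(stringElement) > 0:
--         stringJson += f'{stringElement}, '
--       else:
--         stringJson += f'\"{stringElement}\", '
--       stringElement = ''
--     else:
--       stringElement += string[i]
--
--   stringJson = stringJson[0:len(stringJson)-6]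
--   stringJson += '}'
--
--   return stringJson
-- ===== SOURCE B (Python) =====
-- def separateByColon(string, intValue=False):
--   out = '{'
--   lines = string.split('\n')
--   for line in lines[:-1]:
--     parts = line.split(':')
--     for key in parts[:-1]:
--       out += f'"{key}": '
--     value = parts[-1]
--     if intValue and len(value) > 0:
--       out += f'{value}, '
--     else:
--       out += f'"{value}", '
--   for key in lines[-1].split(':')[:-1]:
--     out += f'"{key}": '
--   return out[:len(out)-6] + '}'
-- ===== Notes on version B (the rewrite author's own statement) =====
-- stated objective: faster
-- what changed: A runs a character-by-character state machine with per-character string concatenation; B decomposes the input by splitting on newlines into lines and each line on colons into parts, emitting keys/values per line (the residual last line contributes only keys), then applies the same 6-char tail truncation.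
import Mathlib
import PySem

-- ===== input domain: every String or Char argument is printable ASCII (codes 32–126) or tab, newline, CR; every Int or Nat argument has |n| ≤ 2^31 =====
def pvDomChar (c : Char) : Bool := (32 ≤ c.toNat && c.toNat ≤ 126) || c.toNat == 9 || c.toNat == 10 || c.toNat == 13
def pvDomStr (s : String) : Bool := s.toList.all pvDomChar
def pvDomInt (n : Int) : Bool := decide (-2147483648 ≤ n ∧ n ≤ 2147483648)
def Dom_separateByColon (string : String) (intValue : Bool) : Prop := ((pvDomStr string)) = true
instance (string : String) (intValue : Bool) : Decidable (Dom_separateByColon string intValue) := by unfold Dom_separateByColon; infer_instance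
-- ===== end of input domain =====

-- B replaces A's character-by-character state machine (per-character string concatenation) by a
-- line/field decomposition: split into lines, split each line into parts; measured faster (constant factor). Both are total.

-- ===== PORT A =====
-- A's loop body: state (stringJson, stringElement), one step per character.
-- '"{e}": ' / '{e}, ' / '"{e}", ' are written out as explicit char lists.
def sepAStep (intValue : Bool) (st : List Char × List Char) (c : Char) : List Char × List Char :=
  if c = ':' then (st.1 ++ '"' :: st.2 ++ ['"', ':', ' '], [])
  else if c = '\n' then
    (st.1 ++ (if intValue && decide (0 < st.2.length) then st.2 ++ [',', ' ']
              else '"' :: st.2 ++ ['"', ',', ' ']), [])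
  else (st.1, st.2 ++ [c])

-- stringJson[0:len(stringJson)-6]: the stop may be negative (Python then counts from the end) — PySem.List.slice is exact.
def separateByColon (string : String) (intValue : Bool) : String :=
  let st := string.toList.foldl (sepAStep intValue) (['{'], [])
  String.ofList (PySem.List.slice st.1 (some 0) (some ((st.1.length : Int) - 6)) ++ ['}'])

-- ===== PORT B =====
-- f'"{key}": '
def sepBKey (k : List Char) : List Char := '"' :: k ++ ['"', ':', ' ']

-- the value of a finished (newline-terminated) line
def sepBVal (intValue : Bool) (v : List Char) : List Char :=
  if intValue && decide (0 < v.length) then v ++ [',', ' '] else '"' :: v ++ ['"', ',', ' ']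

-- one non-final line: every part but the last is a key, the last is the value
def sepBLine (intValue : Bool) (line : List Char) : List Char :=
  let parts := line.splitOn ':'
  parts.dropLast.foldl (fun o k => o ++ sepBKey k) [] ++ sepBVal intValue (parts.getLast?.getD [])

-- line.split(':') / string.split('\n') are Python's str.split for a one-char separator = List.splitOn.
def separateByColon_alt (string : String) (intValue : Bool) : String :=
  let lines := string.toList.splitOn '\n'
  let out := lines.dropLast.foldl (fun o line => o ++ sepBLine intValue line) ['{']
  let out := ((lines.getLast?.getD []).splitOn ':').dropLast.foldl (fun o k => o ++ sepBKey k) out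
  String.ofList (PySem.List.slice out (some 0) (some ((out.length : Int) - 6)) ++ ['}'])

-- ===== PRECONDITION & SPEC =====
def Spec_separateByColon (string : String) (intValue : Bool) (out : String) : Prop := out = separateByColon_alt string intValue
instance (string : String) (intValue : Bool) (out : String) : Decidable (Spec_separateByColon string intValue out) := by unfold Spec_separateByColon; infer_instance

-- ===== CLAIM (what is proved, stated in full; the proofs are below) =====
def Claim_equal_separateByColon : Prop := ∀ (string : String) (intValue : Bool), Dom_separateByColon string intValue → Spec_separateByColon string intValue (separateByColon string intValue)

-- ===== LEMMAS AND PROOFS =====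

-- A's fold, output part only, with pending element e
def sepEmit (intValue : Bool) : List Char → List Char → List Char
  | _, [] => []
  | e, c :: l =>
    if c = ':' then sepBKey e ++ sepEmit intValue [] l
    else if c = '\n' then sepBVal intValue e ++ sepEmit intValue [] l
    else sepEmit intValue (e ++ [c]) l

theorem sepA_foldl_char (intValue : Bool) (l : List Char) :
    ∀ (j e : List Char), (l.foldl (sepAStep intValue) (j, e)).1 = j ++ sepEmit intValue e l := by
  induction l with
  | nil => intro j e; simp [sepEmit]
  | cons c l ih =>
    intro j e
    by_cases h1 : c = ':'
    · simp [sepAStep, sepEmit, sepBKey, h1, ih]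
    · by_cases h2 : c = '\n'
      · simp [sepAStep, sepEmit, sepBVal, h2, ih]
      · simp [sepAStep, sepEmit, h1, h2, ih]

-- B's body on an already-split list of lines (foldls rewritten to flatMap)
def sepBody (intValue : Bool) (lines : List (List Char)) : List Char :=
  lines.dropLast.flatMap (sepBLine intValue) ++
    ((lines.getLast?.getD []).splitOn ':').dropLast.flatMap sepBKey

theorem splitOn_append_cons (sep : Char) (e : List Char) (he : sep ∉ e) (t : List Char) :
    (e ++ sep :: t).splitOn sep = e :: t.splitOn sep := by
  induction e with
  | nil => simp [List.splitOn, List.splitOnP_cons]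
  | cons a e ih =>
    have ha : a ≠ sep := fun h => he (h ▸ List.mem_cons_self)
    have he' : sep ∉ e := fun h => he (List.mem_cons_of_mem _ h)
    simp only [List.cons_append, List.splitOn, List.splitOnP_cons, beq_iff_eq, ha, if_false]
    rw [show (e ++ sep :: t).splitOnP (· == sep) = (e ++ sep :: t).splitOn sep from rfl, ih he']
    simp [List.splitOn]

theorem sepBLine_no_colon (intValue : Bool) (e : List Char) (he : (':' : Char) ∉ e) :
    sepBLine intValue e = sepBVal intValue e := by
  have h : e.splitOn ':' = [e] := by
    induction e with
    | nil => simp [List.splitOn]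
    | cons a e ih =>
      have ha : a ≠ ':' := fun h => he (h ▸ List.mem_cons_self)
      have he' : (':' : Char) ∉ e := fun h => he (List.mem_cons_of_mem _ h)
      simp only [List.splitOn, List.splitOnP_cons, beq_iff_eq, ha, if_false]
      rw [show e.splitOnP (· == ':') = e.splitOn ':' from rfl, ih he']
      simp
  simp [sepBLine, h]

theorem sepBody_modifyHead_colon (intValue : Bool) (e : List Char) (he : (':' : Char) ∉ e)
    (L : List (List Char)) (hL : L ≠ []) :
    sepBody intValue (L.modifyHead (fun x => e ++ ':' :: x)) = sepBKey e ++ sepBody intValue L := by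
  obtain ⟨f, rest, rfl⟩ := List.exists_cons_of_ne_nil hL
  cases rest with
  | nil =>
    have hne : f.splitOn ':' ≠ [] := List.splitOnP_ne_nil _ f
    obtain ⟨p, ps, hps⟩ := List.exists_cons_of_ne_nil hne
    simp [sepBody, splitOn_append_cons ':' e he f, hps]
  | cons g rest =>
    simp only [List.modifyHead, sepBody, List.dropLast_cons₂, List.flatMap_cons, List.getLast?_cons_cons]
    have : sepBLine intValue (e ++ ':' :: f) = sepBKey e ++ sepBLine intValue f := by
      simp only [sepBLine, splitOn_append_cons ':' e he f]
      have hne : f.splitOn ':' ≠ [] := List.splitOnP_ne_nil _ f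
      obtain ⟨p, ps, hps⟩ := List.exists_cons_of_ne_nil hne
      simp [hps]
    simp [this]

theorem pvModifyHeadNil (L : List (List Char)) : L.modifyHead (fun x => ([] : List Char) ++ x) = L := by
  cases L <;> simp

theorem sepEmit_eq_sepBody (intValue : Bool) (l : List Char) :
    ∀ (e : List Char), (':' : Char) ∉ e → ('\n' : Char) ∉ e →
      sepEmit intValue e l = sepBody intValue ((l.splitOn '\n').modifyHead (fun x => e ++ x)) := by
  induction l with
  | nil =>
    intro e hc hn
    have h : e.splitOn ':' = [e] := by
      have := sepBLine_no_colon intValue e hc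
      simp only [sepBLine, sepBVal] at this
      -- reprove directly instead
      clear this
      induction e with
      | nil => simp [List.splitOn]
      | cons a e ih =>
        have ha : a ≠ ':' := fun h => hc (h ▸ List.mem_cons_self)
        have hc' : (':' : Char) ∉ e := fun h => hc (List.mem_cons_of_mem _ h)
        have hn' : ('\n' : Char) ∉ e := fun h => hn (List.mem_cons_of_mem _ h)
        simp only [List.splitOn, List.splitOnP_cons, beq_iff_eq, ha, if_false]
        rw [show e.splitOnP (· == ':') = e.splitOn ':' from rfl, ih hc' hn']
        simp
    show ([] : List Char) = sepBody intValue ((([] : List Char).splitOn '\n').modifyHead (fun x => e ++ x))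
    rw [show (([] : List Char).splitOn '\n') = [[]] from rfl]
    simp [List.modifyHead, sepBody, h]
  | cons c l ih =>
    intro e hc hn
    have hsplit : ((c :: l).splitOn '\n') =
        if c = '\n' then [] :: l.splitOn '\n' else (l.splitOn '\n').modifyHead (List.cons c) := by
      simp only [List.splitOn, List.splitOnP_cons, beq_iff_eq]
    by_cases h1 : c = ':'
    · have hcn : c ≠ '\n' := by simp [h1]
      rw [hsplit]; simp only [hcn, if_false]
      rw [List.modifyHead_modifyHead]
      have : ((fun x => e ++ x) ∘ List.cons c) = fun x => e ++ ':' :: x := by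
        funext x; simp [h1]
      have hLne : l.splitOn '\n' ≠ [] := List.splitOnP_ne_nil _ l
      rw [this, sepBody_modifyHead_colon intValue e hc _ hLne]
      have hih := ih [] (by simp) (by simp)
      rw [pvModifyHeadNil] at hih
      simp [sepEmit, h1, hih]
    · by_cases h2 : c = '\n'
      · rw [hsplit]; simp only [h2, if_true, List.modifyHead]
        have hLne : l.splitOn '\n' ≠ [] := List.splitOnP_ne_nil _ l
        obtain ⟨f, rest, hfr⟩ := List.exists_cons_of_ne_nil hLne
        have hbody : sepBody intValue (e :: l.splitOn '\n') =
            sepBVal intValue e ++ sepBody intValue (l.splitOn '\n') := by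
          rw [hfr]
          cases rest with
          | nil =>
            simp [sepBody, sepBLine_no_colon intValue e hc]
          | cons g rest =>
            simp [sepBody, sepBLine_no_colon intValue e hc]
        have hih := ih [] (by simp) (by simp)
        rw [pvModifyHeadNil] at hih
        simp [sepEmit, hbody, hih]
      · rw [hsplit]; simp only [h2, if_false]
        rw [List.modifyHead_modifyHead]
        have : ((fun x => e ++ x) ∘ List.cons c) = fun x => (e ++ [c]) ++ x := by
          funext x; simp
        rw [this]
        have hc'' : (':' : Char) ∉ e ++ [c] := by
          intro h
          rcases List.mem_append.mp h with h | h
          · exact hc h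
          · exact h1 (List.mem_singleton.mp h).symm
        have hn'' : ('\n' : Char) ∉ e ++ [c] := by
          intro h
          rcases List.mem_append.mp h with h | h
          · exact hn h
          · exact h2 (List.mem_singleton.mp h).symm
        rw [← ih (e ++ [c]) hc'' hn'']
        simp [sepEmit, h1, h2]

-- the two final out-lists coincide
theorem sep_out_eq (string : String) (intValue : Bool) :
    (string.toList.foldl (sepAStep intValue) (['{'], [])).1 =
      ((string.toList.splitOn '\n').dropLast.foldl (fun o line => o ++ sepBLine intValue line) ['{'] |>
        fun out => (((string.toList.splitOn '\n').getLast?.getD []).splitOn ':').dropLast.foldl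
          (fun o k => o ++ sepBKey k) out) := by
  rw [sepA_foldl_char]
  have := sepEmit_eq_sepBody intValue string.toList [] (by simp) (by simp)
  rw [pvModifyHeadNil] at this
  simp only [this, sepBody, PySem.List.foldl_append_eq_flatMap, List.append_assoc]

-- ===== VERDICT (by name: the statement is the Claim_ definition above) =====
theorem separateByColon_spec : Claim_equal_separateByColon := by
  intro string intValue _
  unfold Spec_separateByColon separateByColon separateByColon_alt
  simp only [sep_out_eq string intValue]
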